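-- pv_equiv track=rewrite | github.com/tusharsuthar108/Assignment5 | police_thief.py | police_thief
-- ===== SOURCE A (Python) =====
-- def police_thief(arr, k):
--   police = []
--   thief = []
--   caught = 0
--
--   for i in range(len(arr)):
--     if arr[i] == 'P':
--       police.append(i)
--     elif arr[i] == 'T':
--       thief.append(i)
--
--   i = 0
--   j = 0
--
--   while i < len(police) and j < len(thief):
--     if abs(police[i] - thief[j]) <= k:
--       caught += 1
--       i += 1
--       j += 1
--     elif police[i] < thief[j]:
--       i += 1
--     else:
--       j += 1
--
--   return caught
-- ===== SOURCE B (Python) =====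
-- def police_thief(arr, k):
--     # One online pass: at any moment only one kind can be waiting, so a single
--     # queue of unmatched indices plus a tag of their kind is enough.
--     caught = 0
--     pend = []   # indices of unmatched elements, all of kind `kind`, increasing
--     kind = ''   # which kind pend holds ('P' or 'T'); irrelevant while pend is empty
--     for i, c in enumerate(arr):
--         if c != 'P' and c != 'T':
--             continue
--         if not pend or kind == c:
--             pend.append(i)
--             kind = c
--         else:
--             while pend and pend[0] < i - k:
--                 pend.pop(0)
--             if pend:
--                 pend.pop(0)
--                 caught += 1
--             else:
--                 pend = [i]
--                 kind = c
--     return caught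
-- ===== Notes on version B (the rewrite author's own statement) =====
-- stated objective: alternative
-- what changed: B replaces A's two-phase collect-then-two-pointer scan with a single online pass that keeps one queue of unmatched indices (only one kind can ever be waiting) and matches/discards stale entries as it goes.
import Mathlib
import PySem

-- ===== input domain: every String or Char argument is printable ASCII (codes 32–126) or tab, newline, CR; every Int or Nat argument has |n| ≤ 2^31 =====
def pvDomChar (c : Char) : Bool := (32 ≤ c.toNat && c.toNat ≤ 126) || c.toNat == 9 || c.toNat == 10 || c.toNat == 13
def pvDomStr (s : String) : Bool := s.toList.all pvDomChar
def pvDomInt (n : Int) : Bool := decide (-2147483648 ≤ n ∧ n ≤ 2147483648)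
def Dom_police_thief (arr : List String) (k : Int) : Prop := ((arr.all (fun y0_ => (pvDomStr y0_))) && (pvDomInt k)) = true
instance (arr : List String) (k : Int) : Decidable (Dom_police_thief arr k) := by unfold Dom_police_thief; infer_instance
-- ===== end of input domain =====

-- B does the same matching in one online pass instead of A's collect-then-two-pointer; same cost, equal return value (proved below).

-- ===== PORT A =====
-- A's while loop over pointers i, j into police/thief, ported as the obvious
-- recursion consuming the two lists from the front with the caught accumulator.
def twoPtrA (k : Int) : Int → List Int → List Int → Int
  | caught, p :: ps, t :: ts =>
      if |p - t| ≤ k then twoPtrA k (caught + 1) ps ts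
      else if p < t then twoPtrA k caught ps (t :: ts)
      else twoPtrA k caught (p :: ps) ts
  | caught, _, _ => caught
termination_by _ ps ts => ps.length + ts.length

def police_thief (arr : List String) (k : Int) : Int :=
  -- for i in range(len(arr)): arr[i] — i is always in range, so pyGetD's default is never used
  let pt := (PySem.List.pyRange 0 arr.length 1).foldl
    (fun (s : List Int × List Int) i =>
      let c := PySem.List.pyGetD arr i ""
      if c == "P" then (s.1 ++ [i], s.2)
      else if c == "T" then (s.1, s.2 ++ [i]) else s)
    ([], [])
  twoPtrA k 0 pt.1 pt.2

-- ===== PORT B =====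
-- while pend and pend[0] < i - k: pend.pop(0)
def dropStale (k i : Int) : List Int → List Int
  | [] => []
  | t :: ts => if t < i - k then dropStale k i ts else t :: ts

-- one step of B's loop; kind : Bool with true = 'P' (kind is only read when pend ≠ [],
-- and then it always holds 'P' or 'T', so a Bool represents it exactly)
def stepB (k : Int) (s : Int × List Int × Bool) (q : Int × String) : Int × List Int × Bool :=
  if q.2 ≠ "P" ∧ q.2 ≠ "T" then s
  else
    let isP := q.2 == "P"
    if s.2.1 = [] ∨ s.2.2 == isP then (s.1, s.2.1 ++ [q.1], isP)
    else
      match dropStale k q.1 s.2.1 with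
      | [] => (s.1, [q.1], isP)
      | _ :: rest => (s.1 + 1, rest, s.2.2)

def police_thief_alt (arr : List String) (k : Int) : Int :=
  ((PySem.List.enumerate arr 0).foldl (stepB k) (0, [], true)).1

-- ===== PRECONDITION & SPEC =====
def Spec_police_thief (arr : List String) (k : Int) (out : Int) : Prop := out = police_thief_alt arr k
instance (arr : List String) (k : Int) (out : Int) : Decidable (Spec_police_thief arr k out) := by unfold Spec_police_thief; infer_instance

-- ===== CLAIM (what is proved, stated in full; the proofs are below) =====
def Claim_equal_police_thief : Prop := ∀ (arr : List String) (k : Int), Dom_police_thief arr k → Spec_police_thief arr k (police_thief arr k)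

-- ===== LEMMAS AND PROOFS =====

-- positions of value c in an enumerated list
def posOf (c : String) (l : List (Int × String)) : List Int :=
  (l.filter (fun q => q.2 == c)).map Prod.fst

theorem mem_dropStale {k i x : Int} : ∀ {ps : List Int}, x ∈ dropStale k i ps → x ∈ ps := by
  intro ps
  induction ps with
  | nil => simp [dropStale]
  | cons t ts ih =>
      simp only [dropStale]
      split
      · intro h; exact List.mem_cons_of_mem _ (ih h)
      · exact id

-- stale-drop vs two-pointer, pending thieves
theorem twoPtrA_pend_thief (k i : Int) :
    ∀ (pend : List Int), (∀ t ∈ pend, t < i) → ∀ (caught : Int) (P T : List Int),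
    twoPtrA k caught (i :: P) (pend ++ T) =
      (match dropStale k i pend with
       | [] => twoPtrA k caught (i :: P) T
       | _ :: rest => twoPtrA k (caught + 1) P (rest ++ T)) := by
  intro pend
  induction pend with
  | nil => intro _ caught P T; simp [dropStale]
  | cons t0 ts ih =>
      intro h caught P T
      have ht0 : t0 < i := h t0 (by simp)
      by_cases hst : t0 < i - k
      · have habs : ¬ |i - t0| ≤ k := by
          rw [abs_of_pos (by omega)]; omega
        simp only [List.cons_append, twoPtrA, habs, if_false, if_neg (by omega : ¬ i < t0),
          dropStale, if_pos hst]
        exact ih (fun t ht => h t (List.mem_cons_of_mem _ ht)) caught P T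
      · have habs : |i - t0| ≤ k := by
          rw [abs_of_pos (by omega)]; omega
        simp [twoPtrA, habs, dropStale, hst]

-- stale-drop vs two-pointer, pending police
theorem twoPtrA_pend_police (k i : Int) :
    ∀ (pend : List Int), (∀ p ∈ pend, p < i) → ∀ (caught : Int) (P T : List Int),
    twoPtrA k caught (pend ++ P) (i :: T) =
      (match dropStale k i pend with
       | [] => twoPtrA k caught P (i :: T)
       | _ :: rest => twoPtrA k (caught + 1) (rest ++ P) T) := by
  intro pend
  induction pend with
  | nil => intro _ caught P T; simp [dropStale]
  | cons p0 ps ih =>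
      intro h caught P T
      have hp0 : p0 < i := h p0 (by simp)
      by_cases hst : p0 < i - k
      · have habs : ¬ |p0 - i| ≤ k := by
          rw [abs_of_neg (by omega)]; omega
        simp only [List.cons_append, twoPtrA, habs, if_false, if_pos hp0,
          dropStale, if_pos hst]
        exact ih (fun p hp => h p (List.mem_cons_of_mem _ hp)) caught P T
      · have habs : |p0 - i| ≤ k := by
          rw [abs_of_neg (by omega)]; omega
        simp [twoPtrA, habs, dropStale, hst]

-- main invariant: B's online fold equals A's two-pointer on the remaining stream
theorem runB_eq_twoPtrA (k : Int) :
    ∀ (l : List (Int × String)) (caught : Int) (pend : List Int) (kind : Bool),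
      (∀ t ∈ pend, ∀ q ∈ l, t < q.1) →
      l.Pairwise (fun a b => a.1 < b.1) →
      (l.foldl (stepB k) (caught, pend, kind)).1 =
        twoPtrA k caught (if kind then pend ++ posOf "P" l else posOf "P" l)
                         (if kind then posOf "T" l else pend ++ posOf "T" l) := by
  intro l
  induction l with
  | nil =>
      intro caught pend kind _ _
      cases kind <;> cases pend <;> simp [posOf, twoPtrA]
  | cons q l' ih =>
      intro caught pend kind hlt hmono
      obtain ⟨i, c⟩ := q
      have hmono' := (List.pairwise_cons.mp hmono).2
      have hhead := (List.pairwise_cons.mp hmono).1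
      have hlt' : ∀ t ∈ pend, ∀ q' ∈ l', t < q'.1 :=
        fun t ht q' hq' => hlt t ht q' (List.mem_cons_of_mem _ hq')
      have hlti : ∀ q' ∈ l', i < q'.1 := fun q' hq' => hhead q' hq'
      have hpendi : ∀ t ∈ pend, t < i := fun t ht => hlt t ht (i, c) (by simp)
      by_cases hP : c = "P"
      · subst hP
        have hposP : posOf "P" ((i, "P") :: l') = i :: posOf "P" l' := by simp [posOf]
        have hposT : posOf "T" ((i, "P") :: l') = posOf "T" l' := by simp [posOf]
        rw [hposP, hposT]
        by_cases hpe : pend = []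
        · subst hpe
          have hstep : stepB k (caught, [], kind) (i, "P") = (caught, [i], true) := by
            simp [stepB]
          rw [List.foldl_cons, hstep,
            ih caught [i] true (by simpa using hlti) hmono']
          cases kind <;> simp
        · cases hk : kind with
          | true =>
              have hstep : stepB k (caught, pend, true) (i, "P") = (caught, pend ++ [i], true) := by
                simp [stepB]
              rw [List.foldl_cons, hstep,
                ih caught (pend ++ [i]) true
                  (by intro t ht q' hq'
                      rcases List.mem_append.mp ht with h1 | h1
                      · exact hlt' t h1 q' hq'
                      · simp at h1; subst h1; exact hlti q' hq') hmono']
              simp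
          | false =>
              simp only [Bool.false_eq_true, if_false]
              rw [twoPtrA_pend_thief k i pend hpendi caught (posOf "P" l') (posOf "T" l')]
              cases hds : dropStale k i pend with
              | nil =>
                  have hstep : stepB k (caught, pend, false) (i, "P") = (caught, [i], true) := by
                    simp [stepB, hpe, hds]
                  rw [List.foldl_cons, hstep,
                    ih caught [i] true (by simpa using hlti) hmono']
                  simp
              | cons t0 rest =>
                  have hstep : stepB k (caught, pend, false) (i, "P") = (caught + 1, rest, false) := by
                    simp [stepB, hpe, hds]
                  rw [List.foldl_cons, hstep,
                    ih (caught + 1) rest false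
                      (by intro t ht q' hq'
                          exact hlt' t (mem_dropStale (hds ▸ List.mem_cons_of_mem t0 ht)) q' hq')
                      hmono']
                  simp
      · by_cases hT : c = "T"
        · subst hT
          have hposP : posOf "P" ((i, "T") :: l') = posOf "P" l' := by simp [posOf]
          have hposT : posOf "T" ((i, "T") :: l') = i :: posOf "T" l' := by simp [posOf]
          rw [hposP, hposT]
          by_cases hpe : pend = []
          · subst hpe
            have hstep : stepB k (caught, [], kind) (i, "T") = (caught, [i], false) := by
              simp [stepB]
            rw [List.foldl_cons, hstep,
              ih caught [i] false (by simpa using hlti) hmono']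
            cases kind <;> simp
          · cases hk : kind with
            | false =>
                have hstep : stepB k (caught, pend, false) (i, "T") = (caught, pend ++ [i], false) := by
                  simp [stepB]
                rw [List.foldl_cons, hstep,
                  ih caught (pend ++ [i]) false
                    (by intro t ht q' hq'
                        rcases List.mem_append.mp ht with h1 | h1
                        · exact hlt' t h1 q' hq'
                        · simp at h1; subst h1; exact hlti q' hq') hmono']
                simp
            | true =>
                simp only [if_true]
                rw [twoPtrA_pend_police k i pend hpendi caught (posOf "P" l') (posOf "T" l')]
                cases hds : dropStale k i pend with
                | nil =>
                    have hstep : stepB k (caught, pend, true) (i, "T") = (caught, [i], false) := by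
                      simp [stepB, hpe, hds]
                    rw [List.foldl_cons, hstep,
                      ih caught [i] false (by simpa using hlti) hmono']
                    simp
                | cons p0 rest =>
                    have hstep : stepB k (caught, pend, true) (i, "T") = (caught + 1, rest, true) := by
                      simp [stepB, hpe, hds]
                    rw [List.foldl_cons, hstep,
                      ih (caught + 1) rest true
                        (by intro t ht q' hq'
                            exact hlt' t (mem_dropStale (hds ▸ List.mem_cons_of_mem p0 ht)) q' hq')
                        hmono']
                    simp
        · have hposP : posOf "P" ((i, c) :: l') = posOf "P" l' := by simp [posOf, hP]
          have hposT : posOf "T" ((i, c) :: l') = posOf "T" l' := by simp [posOf, hT]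
          rw [hposP, hposT]
          have hstep : stepB k (caught, pend, kind) (i, c) = (caught, pend, kind) := by
            simp [stepB, hP, hT]
          rw [List.foldl_cons, hstep]
          exact ih caught pend kind hlt' hmono'

-- enumerate of a snoc
theorem enumerate_append_singleton {α : Type} (x : α) :
    ∀ (xs : List α) (s : Int),
    PySem.List.enumerate (xs ++ [x]) s = PySem.List.enumerate xs s ++ [(s + xs.length, x)] := by
  intro xs
  induction xs with
  | nil => intro s; simp [PySem.List.enumerate_cons, PySem.List.enumerate_nil]
  | cons y ys ih =>
      intro s
      rw [List.cons_append, PySem.List.enumerate_cons, ih (s + 1), PySem.List.enumerate_cons,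
        List.length_cons]
      push_cast
      rw [show s + 1 + (ys.length : Int) = s + ((ys.length : Int) + 1) by ring]
      simp

-- bridge: A's index loop over range(len(arr)) equals a fold over enumerate(arr)
theorem foldA_eq_enumerate {σ : Type} (f : σ → Int → String → σ) :
    ∀ (arr : List String) (s : σ),
    (PySem.List.pyRange 0 arr.length 1).foldl (fun st i => f st i (PySem.List.pyGetD arr i "")) s
      = (PySem.List.enumerate arr 0).foldl (fun st q => f st q.1 q.2) s := by
  intro arr
  induction arr using List.reverseRecOn with
  | nil => intro s; simp [PySem.List.enumerate_nil]
  | append_singleton ys y ih =>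
      intro s
      have hlen : ((ys ++ [y]).length : Int) = (ys.length : Int) + 1 := by
        simp
      rw [hlen, PySem.List.pyRange_one_succ_right (by omega),
        List.foldl_append, enumerate_append_singleton, List.foldl_append]
      have hcongr :
          (PySem.List.pyRange 0 ys.length 1).foldl
            (fun st i => f st i (PySem.List.pyGetD (ys ++ [y]) i "")) s
          = (PySem.List.pyRange 0 ys.length 1).foldl
            (fun st i => f st i (PySem.List.pyGetD ys i "")) s := by
        apply PySem.List.foldl_congr_mem
        intro st i hi
        have hib := (PySem.List.mem_pyRange_one).mp hi
        have h1 : PySem.List.pyGetD (ys ++ [y]) i "" = ys[i.toNat] := by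
          rw [PySem.List.pyGetD_eq_getElem (ys ++ [y]) "" hib.1 (by simp; omega)]
          exact List.getElem_append_left (by omega)
        have h2 : PySem.List.pyGetD ys i "" = ys[i.toNat] :=
          PySem.List.pyGetD_eq_getElem ys "" hib.1 (by simpa using hib.2)
        rw [h1, h2]
      rw [hcongr, ih]
      simp only [List.foldl_cons, List.foldl_nil, zero_add]
      rw [PySem.List.pyGetD_eq_getElem (ys ++ [y]) "" (by omega) (by simp)]
      simp

-- the collector fold yields exactly (positions of "P", positions of "T")
theorem collect_eq_posOf :
    ∀ (l : List (Int × String)) (ps ts : List Int),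
    l.foldl (fun (s : List Int × List Int) q =>
        if q.2 == "P" then (s.1 ++ [q.1], s.2)
        else if q.2 == "T" then (s.1, s.2 ++ [q.1]) else s) (ps, ts)
      = (ps ++ posOf "P" l, ts ++ posOf "T" l) := by
  intro l
  induction l with
  | nil => intro ps ts; simp [posOf]
  | cons q l' ih =>
      intro ps ts
      rw [List.foldl_cons]
      by_cases hP : q.2 = "P"
      · rw [if_pos (by simp [hP]), ih (ps ++ [q.1]) ts]
        simp [posOf, hP]
      · rw [if_neg (by simp [hP])]
        by_cases hT : q.2 = "T"
        · rw [if_pos (by simp [hT]), ih ps (ts ++ [q.1])]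
          simp [posOf, hT]
        · have h1 : posOf "P" (q :: l') = posOf "P" l' := by simp [posOf, hP]
          have h2 : posOf "T" (q :: l') = posOf "T" l' := by simp [posOf, hT]
          rw [if_neg (by simp [hT]), ih ps ts, h1, h2]

theorem enumerate_pairwise (arr : List String) :
    (PySem.List.enumerate arr 0).Pairwise (fun a b => a.1 < b.1) := by
  have h := PySem.List.map_fst_enumerate arr 0
  have hp : ((PySem.List.enumerate arr 0).map Prod.fst).Pairwise (· < ·) := by
    rw [h]; exact PySem.List.pairwise_lt_pyRange_one 0 (0 + arr.length)
  exact (List.pairwise_map.mp hp)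

-- ===== VERDICT (by name: the statement is the Claim_ definition above) =====
theorem police_thief_spec : Claim_equal_police_thief := by
  intro arr k _
  unfold Spec_police_thief police_thief police_thief_alt
  rw [foldA_eq_enumerate (fun (s : List Int × List Int) i c =>
        if c == "P" then (s.1 ++ [i], s.2)
        else if c == "T" then (s.1, s.2 ++ [i]) else s) arr ([], [])]
  rw [collect_eq_posOf (PySem.List.enumerate arr 0) [] []]
  rw [runB_eq_twoPtrA k (PySem.List.enumerate arr 0) 0 [] true (by simp)
    (enumerate_pairwise arr)]
  simp
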